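-- pv_equiv track=rewrite | github.com/uditjainstjis/mewtwo | synapta_src/src/eval/generate_external_md_sections.py | build_catalog_schedule
-- ===== SOURCE A (Python) =====
-- def build_catalog_schedule(pairs: list[tuple[str, str]], count: int, offset: int = 0) -> list[tuple[str, str]]:
--     if not pairs:
--         raise ValueError("Empty pair catalog")
--     out = []
--     idx = offset
--     while len(out) < count:
--         out.append(pairs[idx % len(pairs)])
--         idx += 1
--     return out
-- ===== SOURCE B (Python) =====
-- def build_catalog_schedule(pairs: list[tuple[str, str]], count: int, offset: int = 0) -> list[tuple[str, str]]:
--     if not pairs: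
--         raise ValueError("Empty pair catalog")
--     n = len(pairs)
--     start = offset % n
--     rotated = pairs[start:] + pairs[:start]
--     return (rotated * (count // n + 1))[:count]
-- ===== Notes on version B (the rewrite author's own statement) =====
-- stated objective: idiomatic
-- what changed: Replaces the element-by-element while-loop with per-index modulo arithmetic by computing the rotation offset % n once, rotating the catalog with two slices, repeating the whole rotated list count // n + 1 times and slicing the first count items.
import Mathlib
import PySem

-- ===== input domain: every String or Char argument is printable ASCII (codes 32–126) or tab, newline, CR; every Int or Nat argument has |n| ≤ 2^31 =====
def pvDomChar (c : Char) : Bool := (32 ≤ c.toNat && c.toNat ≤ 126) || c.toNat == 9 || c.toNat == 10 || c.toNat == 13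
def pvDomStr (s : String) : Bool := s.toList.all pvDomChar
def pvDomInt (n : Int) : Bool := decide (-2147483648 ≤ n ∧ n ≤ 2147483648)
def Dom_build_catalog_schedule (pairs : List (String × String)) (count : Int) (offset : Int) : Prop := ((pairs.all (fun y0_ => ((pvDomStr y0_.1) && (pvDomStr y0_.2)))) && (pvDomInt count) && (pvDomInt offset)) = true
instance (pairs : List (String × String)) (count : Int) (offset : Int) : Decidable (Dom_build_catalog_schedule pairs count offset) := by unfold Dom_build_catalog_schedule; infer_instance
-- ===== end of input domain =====

-- B replaces A's element-by-element modulo while-loop by one rotation (slice + slice) and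
-- whole-list repetition followed by a single slice (objective: idiomatic; not claimed faster).

-- ===== PORT A =====
-- the while-loop of A: 'while len(out) < count: out.append(pairs[idx % len(pairs)]); idx += 1'
def bcsLoop (pairs : List (String × String)) (count : Int) (out : List (String × String)) (idx : Int) : List (String × String) :=
  if h : (out.length : Int) < count then
    match PySem.List.pyGet? pairs (PySem.Int.mod idx (pairs.length : Int)) with
    | none => out   -- unreachable under Pre_ (pairs ≠ []): Python would raise only on empty pairs
    | some p => bcsLoop pairs count (out ++ [p]) (idx + 1)
  else out
termination_by (count - (out.length : Int)).toNat
decreasing_by simp only [List.length_append, List.length_cons, List.length_nil]; omega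

def build_catalog_schedule (pairs : List (String × String)) (count : Int) (offset : Int) : List (String × String) :=
  if pairs = [] then []   -- Python raises ValueError here; excluded by Pre_
  else bcsLoop pairs count [] offset

-- ===== PORT B =====
def build_catalog_schedule_alt (pairs : List (String × String)) (count : Int) (offset : Int) : List (String × String) :=
  if pairs = [] then []   -- Python raises ValueError here; excluded by Pre_
  else
    let n : Int := pairs.length
    let start := PySem.Int.mod offset n
    let rotated := PySem.List.slice pairs (some start) none ++ PySem.List.slice pairs none (some start)
    PySem.List.slice (PySem.List.pyRepeat rotated (PySem.Int.floordiv count n + 1)) none (some count)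

-- ===== PRECONDITION & SPEC =====
-- Pre_ excludes exactly the inputs where both Pythons raise ValueError: the empty catalog.
def Pre_build_catalog_schedule (pairs : List (String × String)) (count : Int) (offset : Int) : Prop := pairs ≠ []
instance (pairs : List (String × String)) (count : Int) (offset : Int) : Decidable (Pre_build_catalog_schedule pairs count offset) := by unfold Pre_build_catalog_schedule; infer_instance
def pvWitness_build_catalog_schedule : (List (String × String)) × Int × Int := ([("a", "b"), ("c", "d")], 5, -3)
def Spec_build_catalog_schedule (pairs : List (String × String)) (count : Int) (offset : Int) (out : List (String × String)) : Prop := out = build_catalog_schedule_alt pairs count offset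
instance (pairs : List (String × String)) (count : Int) (offset : Int) (out : List (String × String)) : Decidable (Spec_build_catalog_schedule pairs count offset out) := by unfold Spec_build_catalog_schedule; infer_instance

-- ===== CLAIM (what is proved, stated in full; the proofs are below) =====
def Claim_equal_build_catalog_schedule : Prop := ∀ (pairs : List (String × String)) (count : Int) (offset : Int), Dom_build_catalog_schedule pairs count offset → Pre_build_catalog_schedule pairs count offset → Spec_build_catalog_schedule pairs count offset (build_catalog_schedule pairs count offset)

-- ===== LEMMAS AND PROOFS =====

-- the element both programs put at logical position j
def schedElem (pairs : List (String × String)) (j : Int) : String × String :=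
  pairs.getD ((j % (pairs.length : Int)).toNat) ("", "")

lemma loopA_eq (pairs : List (String × String)) (hp : pairs ≠ []) (count : Int) :
    ∀ (k : Nat) (out : List (String × String)) (idx : Int),
      (count - (out.length : Int)).toNat = k →
      bcsLoop pairs count out idx = out ++ (List.range k).map (fun i : Nat => schedElem pairs (idx + (i : Int))) := by
  intro k
  induction k with
  | zero =>
    intro out idx hk
    unfold bcsLoop
    rw [dif_neg (by omega)]
    simp
  | succ k ih =>
    intro out idx hk
    have hL : 0 < (pairs.length : Int) := by exact_mod_cast List.length_pos_iff.mpr hp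
    have hlen : (out.length : Int) < count := by omega
    unfold bcsLoop
    have hne : (pairs.length : Int) ≠ 0 := by omega
    rw [dif_pos hlen, PySem.Int.mod_eq_emod_of_pos hL,
        PySem.List.pyGet?_eq_some_getElem pairs (Int.emod_nonneg idx hne) (Int.emod_lt_of_pos idx hL)]
    dsimp only
    rw [ih (out ++ [_]) (idx + 1) (by simp only [List.length_append, List.length_cons, List.length_nil]; omega)]
    have hhead : pairs[(idx % (pairs.length : Int)).toNat]'(by
        have := Int.emod_nonneg idx (show (pairs.length:Int) ≠ 0 by omega)
        have := Int.emod_lt_of_pos idx hL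
        omega) = schedElem pairs idx := by
      unfold schedElem
      rw [List.getD_eq_getElem]
    have hshift : ∀ i : Nat, schedElem pairs (idx + 1 + (i : Int)) = schedElem pairs (idx + ((i + 1 : Nat) : Int)) := by
      intro i; congr 1; push_cast; ring
    rw [List.range_succ_eq_map]
    simp only [List.map_cons, List.map_map, Nat.cast_zero, add_zero, List.append_assoc,
      List.singleton_append, hhead]
    congr 2
    simp only [List.map_inj_left, Function.comp_apply]
    intro a _
    have h := hshift a
    push_cast at h
    exact h

lemma A_char (pairs : List (String × String)) (count offset : Int) (hp : pairs ≠ []) :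
    build_catalog_schedule pairs count offset =
      (List.range count.toNat).map (fun i : Nat => schedElem pairs (offset + (i : Int))) := by
  unfold build_catalog_schedule
  rw [if_neg hp]
  exact loopA_eq pairs hp count count.toNat [] offset (by simp)

lemma flatrep_length {α : Type} (xs : List α) (m : Nat) :
    ((List.replicate m xs).flatten).length = m * xs.length := by
  induction m with
  | zero => simp
  | succ m ih => simp [List.replicate_succ, Nat.succ_mul, ih]; ring

lemma flatrep_getElem {α : Type} (xs : List α) (m j : Nat)
    (h : j < ((List.replicate m xs).flatten).length) :
    ((List.replicate m xs).flatten)[j] =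
      xs[j % xs.length]'(Nat.mod_lt _ (by
        rcases Nat.eq_zero_or_pos xs.length with h0 | h0
        · simp [List.eq_nil_of_length_eq_zero h0] at h
        · exact h0)) := by
  induction m generalizing j with
  | zero => simp at h
  | succ m ih =>
    have hx : 0 < xs.length := by
      rcases Nat.eq_zero_or_pos xs.length with h0 | h0
      · simp [List.eq_nil_of_length_eq_zero h0] at h
      · exact h0
    simp only [List.replicate_succ, List.flatten_cons] at h ⊢
    by_cases hj : j < xs.length
    · rw [List.getElem_append_left hj]
      congr 1
      exact (Nat.mod_eq_of_lt hj).symm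
    · have hj' : xs.length ≤ j := Nat.le_of_not_lt hj
      rw [List.getElem_append_right hj']
      rw [ih (j - xs.length) (by
        rw [List.length_append, flatrep_length] at h
        rw [flatrep_length]
        omega)]
      congr 1
      rw [Nat.mod_eq_sub_mod hj']

lemma B_char (pairs : List (String × String)) (count offset : Int) (hp : pairs ≠ []) :
    build_catalog_schedule_alt pairs count offset =
      (List.range count.toNat).map (fun i : Nat => schedElem pairs (offset + (i : Int))) := by
  unfold build_catalog_schedule_alt
  rw [if_neg hp]
  dsimp only
  have hLn : 0 < pairs.length := List.length_pos_iff.mpr hp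
  have hL : 0 < (pairs.length : Int) := by exact_mod_cast hLn
  rw [PySem.Int.mod_eq_emod_of_pos hL, PySem.Int.floordiv_eq_ediv_of_pos hL]
  have hst0 : 0 ≤ offset % (pairs.length : Int) := Int.emod_nonneg _ (by omega)
  have hst1 : offset % (pairs.length : Int) < pairs.length := Int.emod_lt_of_pos _ hL
  set s : Nat := (offset % (pairs.length : Int)).toNat with hs
  have hsle : s ≤ pairs.length := by omega
  rw [PySem.List.slice_from pairs hst0, PySem.List.slice_to pairs hst0, ← hs,
      ← List.rotate_eq_drop_append_take hsle]
  by_cases hc : count ≤ 0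
  · rcases lt_or_eq_of_le hc with hlt | heq
    · have hk : count / (pairs.length : Int) + 1 ≤ 0 := by
        have := Int.ediv_neg_of_neg_of_pos hlt hL
        omega
      have : (count / (pairs.length : Int) + 1).toNat = 0 := by omega
      simp [PySem.List.pyRepeat, this, PySem.List.slice, Int.toNat_of_nonpos hc]
    · subst heq
      rw [PySem.List.slice_to (PySem.List.pyRepeat _ _) (le_refl 0)]
      simp
  · replace hc : 0 < count := by omega
    have hkpos : 0 < count / (pairs.length : Int) + 1 := by
      have : 0 ≤ count / (pairs.length : Int) := Int.ediv_nonneg (by omega) (by omega)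
      omega
    have hcle : count.toNat ≤ (count / (pairs.length : Int) + 1).toNat * pairs.length := by
      have h1 : count < (count / (pairs.length : Int) + 1) * (pairs.length : Int) :=
        Int.lt_ediv_add_one_mul_self count hL
      have h2 : ((count / (pairs.length : Int) + 1).toNat : Int) = count / (pairs.length : Int) + 1 := by omega
      have : (count.toNat : Int) ≤ ((count / (pairs.length : Int) + 1).toNat * pairs.length : Int) := by
        push_cast [h2]
        omega
      exact_mod_cast this
    unfold PySem.List.pyRepeat
    rw [PySem.List.slice_to ((List.replicate (count / (pairs.length : Int) + 1).toNat (pairs.rotate s)).flatten) (by omega : (0:Int) ≤ count)]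
    have hbiglen : ((List.replicate (count / (pairs.length : Int) + 1).toNat (pairs.rotate s)).flatten).length
        = (count / (pairs.length : Int) + 1).toNat * pairs.length := by rw [flatrep_length]; simp
    apply List.ext_getElem
    · simp only [List.length_take, List.length_map, List.length_range, hbiglen]
      omega
    · intro j hj1 hj2
      simp only [List.length_take, hbiglen] at hj1
      have hjc : j < count.toNat := by omega
      rw [List.getElem_take, flatrep_getElem _ _ _ (by rw [hbiglen]; omega)]
      have hrotlen : (pairs.rotate s).length = pairs.length := by simp
      have hjm : j % (pairs.rotate s).length < (pairs.rotate s).length := by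
        rw [hrotlen]; exact Nat.mod_lt _ hLn
      rw [List.getElem_rotate]
      simp only [List.getElem_map, List.getElem_range]
      unfold schedElem
      have hidx : (j % (pairs.rotate s).length + s) % pairs.length
          = ((offset + (j : Int)) % (pairs.length : Int)).toNat := by
        have hcast : (((j % (pairs.rotate s).length + s) % pairs.length : Nat) : Int)
            = (offset + (j : Int)) % (pairs.length : Int) := by
          rw [hrotlen]
          push_cast [Int.natCast_mod]
          rw [Int.toNat_of_nonneg hst0]
          conv_rhs => rw [Int.add_comm, Int.add_emod]
        omega
      rw [List.getD_eq_getElem _ _ (by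
        have := Int.emod_nonneg (offset + (j:Int)) (show (pairs.length:Int) ≠ 0 by omega)
        have := Int.emod_lt_of_pos (offset + (j:Int)) hL
        omega)]
      congr 1

-- ===== VERDICT (by name: the statement is the Claim_ definition above) =====
theorem build_catalog_schedule_spec : Claim_equal_build_catalog_schedule := by
  intro pairs count offset _ hp
  unfold Spec_build_catalog_schedule
  rw [A_char pairs count offset hp, B_char pairs count offset hp]
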